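-- pv_equiv track=rewrite | github.com/nabeen/AtCoder | abc/abc124/c.py | cou
-- ===== SOURCE A (Python) =====
-- def cou(S, f, s):
--     num = 0
--     for i in range(len(S)):
--         if i % 2 == 0:
--             if S[i] == f:
--                 num += 1
--             else:
--                 pass
--         elif i % 2 != 0:
--             if S[i] == s:
--                 num += 1
--             else:
--                 pass
--     return num
-- ===== SOURCE B (Python) =====
-- def cou(S, f, s):
--     return sum(c == f for c in S[0::2]) + sum(c == s for c in S[1::2])
-- ===== Notes on version B (the rewrite author's own statement) =====
-- stated objective: simpler
-- what changed: Replaces the indexed loop with its per-index parity branch by two branch-free slice passes: count matches of f in S[0::2] and of s in S[1::2], then add.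
import Mathlib
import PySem

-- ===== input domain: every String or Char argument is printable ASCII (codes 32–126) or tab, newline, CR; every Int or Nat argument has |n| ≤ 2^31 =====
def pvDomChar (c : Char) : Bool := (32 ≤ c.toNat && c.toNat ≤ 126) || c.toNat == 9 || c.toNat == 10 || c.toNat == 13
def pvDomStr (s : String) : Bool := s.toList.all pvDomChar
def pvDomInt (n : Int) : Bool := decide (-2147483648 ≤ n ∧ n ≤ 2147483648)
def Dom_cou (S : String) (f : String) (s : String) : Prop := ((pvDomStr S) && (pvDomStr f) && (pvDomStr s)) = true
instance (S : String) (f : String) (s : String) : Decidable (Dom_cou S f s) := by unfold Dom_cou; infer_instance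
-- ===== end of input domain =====

-- B counts matches of f among the even-indexed characters (S[0::2]) and of s among the odd-indexed
-- ones (S[1::2]) in two branch-free slice passes instead of A's indexed loop with a parity test.


-- ===== PORT A =====
-- Python's `S[i] == f` compares the 1-char string S[i] with the string f; ported exactly as the
-- list equality [c] = f.toList (a 1-char string equals f iff their character lists are equal).
def cou (S : String) (f : String) (s : String) : Int :=
  (PySem.List.pyRange 0 (PySem.Str.len S) 1).foldl
    (fun num i =>
      if PySem.Int.mod i 2 = 0 then
        (if (PySem.Str.pyGet? S i).map (fun c => [c]) = some f.toList then num + 1 else num)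
      else if PySem.Int.mod i 2 ≠ 0 then
        (if (PySem.Str.pyGet? S i).map (fun c => [c]) = some s.toList then num + 1 else num)
      else num)
    0

-- ===== PORT B =====
-- Source B: sum(c == f for c in S[0::2]) + sum(c == s for c in S[1::2]).  A slice never raises
-- (slice? is none only for step 0), so the .getD [] total form is exact here.
def cou_alt (S : String) (f : String) (s : String) : Int :=
  (((PySem.List.slice? S.toList (some 0) none 2).getD []).countP (fun c => [c] == f.toList) : Int)
  + (((PySem.List.slice? S.toList (some 1) none 2).getD []).countP (fun c => [c] == s.toList) : Int)

-- ===== PRECONDITION & SPEC =====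
def Spec_cou (S : String) (f : String) (s : String) (out : Int) : Prop := out = cou_alt S f s
instance (S : String) (f : String) (s : String) (out : Int) : Decidable (Spec_cou S f s out) := by unfold Spec_cou; infer_instance

-- ===== CLAIM (what is proved, stated in full; the proofs are below) =====
def Claim_equal_cou : Prop := ∀ (S : String) (f : String) (s : String), Dom_cou S f s → Spec_cou S f s (cou S f s)

-- ===== LEMMAS AND PROOFS =====

-- every other element of a list, starting with the first
def pvEO {α : Type} : List α → List α
  | [] => []
  | [x] => [x]
  | x :: _ :: xs => x :: pvEO xs

-- alternating count: `true` = next position is even (compare with fl), `false` = odd (compare with sl)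
def pvCnt (fl sl : List Char) : List Char → Bool → Int
  | [], _ => 0
  | c :: cs, true => (if [c] = fl then 1 else 0) + pvCnt fl sl cs false
  | c :: cs, false => (if [c] = sl then 1 else 0) + pvCnt fl sl cs true

theorem pvEO_cons {α : Type} (c : α) (cs : List α) : pvEO (c :: cs) = c :: pvEO cs.tail := by
  cases cs <;> rfl

theorem pvRangeEven {α : Type} (l : List α) :
    (List.range ((l.length + 1) / 2)).filterMap (fun k => l[2 * k]?) = pvEO l := by
  induction l using pvEO.induct with
  | case1 => simp [pvEO]
  | case2 x => simp [pvEO]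
  | case3 x y xs ih =>
      have h2 : ((x :: y :: xs).length + 1) / 2 = (xs.length + 1) / 2 + 1 := by simp; omega
      rw [pvEO, h2, List.range_succ_eq_map]
      simp [List.filterMap_map, Function.comp, Nat.mul_succ, ← ih]

theorem pvRangeOdd {α : Type} (l : List α) :
    (List.range (l.length / 2)).filterMap (fun k => l[1 + 2 * k]?) = pvEO l.tail := by
  cases l with
  | nil => simp [pvEO]
  | cons c cs =>
      have h : (c :: cs).length / 2 = (cs.length + 1) / 2 := by simp
      rw [h, List.tail_cons, ← pvRangeEven cs]
      refine List.filterMap_congr ?_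
      intro k _
      have h1 : 1 + 2 * k = 2 * k + 1 := by omega
      rw [h1, List.getElem?_cons_succ]

theorem pvSliceEven {α : Type} (l : List α) :
    PySem.List.slice? l (some 0) none 2 = some (pvEO l) := by
  rw [← pvRangeEven]
  simp [PySem.List.slice?, PySem.List.sliceIndices]
  have hc : (if 0 < l.length then (((l.length : Int) + 2 - 1) / 2).toNat else 0) = (l.length + 1) / 2 := by
    split <;> omega
  rw [hc]
  refine List.filterMap_congr ?_
  intro k _
  congr 1

theorem pvSliceOdd {α : Type} (l : List α) :
    PySem.List.slice? l (some 1) none 2 = some (pvEO l.tail) := by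
  rw [← pvRangeOdd]
  simp [PySem.List.slice?, PySem.List.sliceIndices]
  have hc : (if 1 < l.length then (((l.length : Int) - min 1 (l.length : Int) + 2 - 1) / 2).toNat else 0) = l.length / 2 := by
    split <;> omega
  rw [hc]
  refine List.filterMap_congr ?_
  intro k hk
  have hk2 := List.mem_range.mp hk
  congr 1
  omega

theorem pvCnt_eq (fl sl : List Char) (l : List Char) :
    pvCnt fl sl l true
      = ((pvEO l).countP (fun c => [c] == fl) : Int) + ((pvEO l.tail).countP (fun c => [c] == sl) : Int)
    ∧ pvCnt fl sl l false
      = ((pvEO l).countP (fun c => [c] == sl) : Int) + ((pvEO l.tail).countP (fun c => [c] == fl) : Int) := by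
  induction l with
  | nil => simp [pvCnt, pvEO]
  | cons c cs ih =>
      obtain ⟨ih1, ih2⟩ := ih
      constructor <;>
        · rw [pvCnt, pvEO_cons, List.countP_cons]
          simp only [ih1, ih2]
          push_cast
          split_ifs with h <;> simp_all <;> ring

theorem pvLoopA (S : String) (fl sl : List Char) :
    ∀ (n : Nat) (k : Nat) (num : Int), S.toList.length - k = n → k ≤ S.toList.length →
    (PySem.List.pyRange (k : Int) ((S.toList.length : Nat) : Int) 1).foldl
      (fun num i =>
        if PySem.Int.mod i 2 = 0 then
          (if (PySem.Str.pyGet? S i).map (fun c => [c]) = some fl then num + 1 else num)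
        else if PySem.Int.mod i 2 ≠ 0 then
          (if (PySem.Str.pyGet? S i).map (fun c => [c]) = some sl then num + 1 else num)
        else num) num
      = num + pvCnt fl sl (S.toList.drop k) (decide (k % 2 = 0)) := by
  intro n
  induction n with
  | zero =>
      intro k num h hk
      have hkl : k = S.toList.length := by omega
      rw [PySem.List.pyRange_one_eq_nil (by exact_mod_cast Nat.cast_le.mpr (le_of_eq hkl.symm))]
      subst hkl
      rw [List.drop_length]
      simp [pvCnt]
  | succ n ih =>
      intro k num h hk
      have hlt : k < S.toList.length := by omega
      rw [PySem.List.pyRange_one_cons (by exact_mod_cast hlt)]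
      rw [List.foldl_cons]
      have hcast : ((k : Int) + 1) = ((k + 1 : Nat) : Int) := by push_cast; ring
      rw [hcast, ih (k+1) _ (by omega) (by omega)]
      have hmod : PySem.Int.mod (k : Int) 2 = ((k % 2 : Nat) : Int) := by
        exact_mod_cast PySem.Int.mod_natCast k 2
      have hget : PySem.Str.pyGet? S (k : Int) = some (S.toList[k]) := by
        simp [List.getElem?_eq_getElem hlt]
      have hdrop : S.toList.drop k = S.toList[k] :: S.toList.drop (k+1) :=
        List.drop_eq_getElem_cons hlt
      rcases Nat.even_or_odd k with hpar | hpar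
      · have h0 : k % 2 = 0 := Nat.even_iff.mp hpar
        have h1 : (k+1) % 2 = 1 := by omega
        have hcnt : pvCnt fl sl (S.toList.drop k) (decide (k % 2 = 0))
            = (if [S.toList[k]] = fl then 1 else 0)
              + pvCnt fl sl (S.toList.drop (k+1)) (decide ((k+1) % 2 = 0)) := by
          rw [hdrop, h0, h1]; rfl
        rw [hcnt, hmod, hget, h0]
        norm_num
        split_ifs <;> omega
      · have h0 : k % 2 = 1 := Nat.odd_iff.mp hpar
        have h1 : (k+1) % 2 = 0 := by omega
        have hcnt : pvCnt fl sl (S.toList.drop k) (decide (k % 2 = 0))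
            = (if [S.toList[k]] = sl then 1 else 0)
              + pvCnt fl sl (S.toList.drop (k+1)) (decide ((k+1) % 2 = 0)) := by
          rw [hdrop, h0, h1]; rfl
        rw [hcnt, hmod, hget, h0]
        norm_num
        split_ifs <;> omega

-- ===== VERDICT (by name: the statement is the Claim_ definition above) =====
theorem cou_spec : Claim_equal_cou := by
  intro S f s _
  unfold Spec_cou cou cou_alt
  rw [pvSliceEven, pvSliceOdd]
  have hlen : PySem.Str.len S = ((S.toList.length : Nat) : Int) := by simp [PySem.Str.len_eq]
  have key := pvLoopA S f.toList s.toList S.toList.length 0 0 (by omega) (by omega)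
  simp only [Nat.cast_zero, List.drop_zero, zero_add, Nat.zero_mod, decide_true] at key
  rw [hlen, key]
  have hc := (pvCnt_eq f.toList s.toList S.toList).1
  simpa using hc
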